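-- pv_equiv track=rewrite | github.com/ai-driven-developer/py-holdem-solver | poker_solver/utils.py | history_label
-- ===== SOURCE A (Python) =====
-- def history_label(history: str) -> str:
--     """Convert a history string like 'xb67' to a human-readable action sequence."""
--     if not history or history == "root":
--         return "Root"
--     parts = []
--     i = 0
--     while i < len(history):
--         if history[i] == 'x':
--             parts.append("Check")
--             i += 1
--         elif history[i] == 'f':
--             parts.append("Fold")
--             i += 1
--         elif history[i] == 'c':
--             parts.append("Call")
--             i += 1
--         elif history[i] == 'b':
--             j = i + 1
--             while j < len(history) and (history[j].isdigit() or history[j] == '.'):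
--                 j += 1
--             parts.append(f"Bet {history[i+1:j]}")
--             i = j
--         elif history[i] == 'r':
--             j = i + 1
--             while j < len(history) and (history[j].isdigit() or history[j] == '.'):
--                 j += 1
--             parts.append(f"Raise {history[i+1:j]}")
--             i = j
--         elif history[i] == '|':
--             parts.append("|")
--             i += 1
--         else:
--             i += 1
--     return " -> ".join(parts)
-- ===== SOURCE B (Python) =====
-- def history_label(history: str) -> str:
--     """Convert a history string like 'xb67' to a human-readable action sequence."""
--     if not history or history == "root":
--         return "Root"
--     # one pass: tokenize into action tokens (a 'b'/'r' token collects its amount), then map+join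
--     toks = []
--     cur = None  # pending bet/raise token still collecting digits/dots
--     for ch in history:
--         if cur is not None and (ch.isdigit() or ch == '.'):
--             cur += ch
--             continue
--         if cur is not None:
--             toks.append(cur)
--             cur = None
--         if ch in 'xfc|':
--             toks.append(ch)
--         elif ch in 'br':
--             cur = ch
--     if cur is not None:
--         toks.append(cur)
--     LABEL = {'x': "Check", 'f': "Fold", 'c': "Call", '|': "|", 'b': "Bet ", 'r': "Raise "}
--     return " -> ".join(LABEL[t[0]] + t[1:] for t in toks)
-- ===== Notes on version B (the rewrite author's own statement) =====
-- stated objective: idiomatic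
-- what changed: Replaced A's index-based while loop with an inner digit-scanning while by a single for-each state-machine pass that tokenizes the history, followed by a table lookup mapping each token to its label and one join.
import Mathlib
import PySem

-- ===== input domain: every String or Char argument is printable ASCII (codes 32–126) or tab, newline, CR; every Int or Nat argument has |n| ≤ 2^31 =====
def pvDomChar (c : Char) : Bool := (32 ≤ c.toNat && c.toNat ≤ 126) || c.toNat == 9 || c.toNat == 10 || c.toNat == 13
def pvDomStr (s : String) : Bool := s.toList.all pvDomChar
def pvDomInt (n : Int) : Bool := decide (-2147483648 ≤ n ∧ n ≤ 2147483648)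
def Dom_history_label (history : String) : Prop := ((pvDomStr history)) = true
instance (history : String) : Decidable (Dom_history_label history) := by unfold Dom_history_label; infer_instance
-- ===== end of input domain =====

-- B replaces A's index loop (with an inner digit-scanning while) by a single state-machine
-- pass that tokenizes the string, followed by a map-to-label and join (objective: idiomatic).

-- ===== PORT A =====
-- A's inner while: consume digits and '.' , return (consumed run, rest)
def pvA_span : List Char → List Char × List Char
  | [] => ([], [])
  | c :: rest =>
    if PySem.Str.isdigit c ∨ c = '.' then
      let p := pvA_span rest
      (c :: p.1, p.2)
    else ([], c :: rest)

theorem pvA_span_snd_len (cs : List Char) : (pvA_span cs).2.length ≤ cs.length := by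
  induction cs with
  | nil => simp [pvA_span]
  | cons c rest ih =>
    simp only [pvA_span]
    split
    · simpa using Nat.le_succ_of_le ih
    · simp

-- A's outer while over the remaining characters, building the parts list
def pvA_loop : List Char → List String
  | [] => []
  | c :: rest =>
    if c = 'x' then "Check" :: pvA_loop rest
    else if c = 'f' then "Fold" :: pvA_loop rest
    else if c = 'c' then "Call" :: pvA_loop rest
    else if c = 'b' then
      ("Bet " ++ String.ofList (pvA_span rest).1) :: pvA_loop (pvA_span rest).2
    else if c = 'r' then
      ("Raise " ++ String.ofList (pvA_span rest).1) :: pvA_loop (pvA_span rest).2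
    else if c = '|' then "|" :: pvA_loop rest
    else pvA_loop rest
termination_by cs => cs.length
decreasing_by
  all_goals simp
  all_goals exact pvA_span_snd_len rest

def history_label (history : String) : String :=
  if history.toList = [] ∨ history.toList = "root".toList then "Root"
  else PySem.Str.join " -> " (pvA_loop history.toList)

-- ===== PORT B =====
-- B: the labels dict LABEL[t[0]] applied to a token's head
def pvB_headLabel (c : Char) : String :=
  if c = 'x' then "Check" else if c = 'f' then "Fold" else if c = 'c' then "Call"
  else if c = '|' then "|" else if c = 'b' then "Bet " else "Raise "

-- B: LABEL[t[0]] + t[1:]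
def pvB_label : List Char → String
  | [] => ""
  | c :: rest => pvB_headLabel c ++ String.ofList rest

-- B: the loop body when no bet/raise token is pending ('if ch in ...' chain)
def pvB_open (toks : List (List Char)) (ch : Char) : List (List Char) × Option (List Char) :=
  if ch = 'x' ∨ ch = 'f' ∨ ch = 'c' ∨ ch = '|' then (toks ++ [[ch]], none)
  else if ch = 'b' ∨ ch = 'r' then (toks, some [ch])
  else (toks, none)

-- B: one iteration of the for-loop; state = (toks, cur)
def pvB_step (st : List (List Char) × Option (List Char)) (ch : Char) :
    List (List Char) × Option (List Char) :=
  match st.2 with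
  | some t =>
    if PySem.Str.isdigit ch ∨ ch = '.' then (st.1, some (t ++ [ch]))
    else pvB_open (st.1 ++ [t]) ch
  | none => pvB_open st.1 ch

-- B: the final 'if cur is not None: toks.append(cur)'
def pvB_flush (st : List (List Char) × Option (List Char)) : List (List Char) :=
  match st.2 with
  | some t => st.1 ++ [t]
  | none => st.1

def history_label_alt (history : String) : String :=
  if history.toList = [] ∨ history.toList = "root".toList then "Root"
  else
    PySem.Str.join " -> "
      ((pvB_flush (history.toList.foldl pvB_step ([], none))).map pvB_label)

-- ===== PRECONDITION & SPEC =====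
def Spec_history_label (history : String) (out : String) : Prop := out = history_label_alt history
instance (history : String) (out : String) : Decidable (Spec_history_label history out) := by unfold Spec_history_label; infer_instance

-- ===== CLAIM (what is proved, stated in full; the proofs are below) =====
def Claim_equal_history_label : Prop := ∀ (history : String), Dom_history_label history → Spec_history_label history (history_label history)

-- ===== LEMMAS AND PROOFS =====

-- raw token decomposition following A's recursion structure (proof-only helper)
def pvTok : List Char → List (List Char)
  | [] => []
  | c :: rest =>
    if c = 'x' ∨ c = 'f' ∨ c = 'c' ∨ c = '|' then [c] :: pvTok rest
    else if c = 'b' ∨ c = 'r' then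
      (c :: (pvA_span rest).1) :: pvTok (pvA_span rest).2
    else pvTok rest
termination_by cs => cs.length
decreasing_by
  all_goals simp
  all_goals exact pvA_span_snd_len rest

-- A's parts are exactly the labels of the raw tokens
theorem pvA_loop_eq_map_label (cs : List Char) : pvA_loop cs = (pvTok cs).map pvB_label := by
  induction cs using pvA_loop.induct <;>
    simp_all [pvA_loop, pvTok, pvB_label, pvB_headLabel]

-- B's state-machine pass computes A's raw tokens (joint invariant for cur = none / cur = some t)
theorem pvB_invariant (cs : List Char) :
    (∀ acc, pvB_flush (cs.foldl pvB_step (acc, none)) = acc ++ pvTok cs) ∧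
    (∀ acc t, pvB_flush (cs.foldl pvB_step (acc, some t)) =
      acc ++ (t ++ (pvA_span cs).1) :: pvTok (pvA_span cs).2) := by
  induction cs with
  | nil => exact ⟨fun acc => by simp [pvB_flush, pvTok], fun acc t => by simp [pvB_flush, pvA_span, pvTok]⟩
  | cons c rest ih =>
    obtain ⟨ihn, ihs⟩ := ih
    have hn : ∀ acc, pvB_flush ((c :: rest).foldl pvB_step (acc, none)) = acc ++ pvTok (c :: rest) := by
      intro acc
      simp only [List.foldl_cons, pvB_step, pvB_open]
      by_cases h1 : c = 'x' ∨ c = 'f' ∨ c = 'c' ∨ c = '|'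
      · simp only [ihn, pvTok, h1, if_pos]
        simp
      · by_cases h2 : c = 'b' ∨ c = 'r'
        · simp only [if_neg h1, if_pos h2, ihs]
          rw [pvTok]
          simp [h1, h2]
        · simp only [if_neg h1, if_neg h2, ihn]
          rw [pvTok]
          simp [h1, h2]
    refine ⟨hn, ?_⟩
    intro acc t
    simp only [List.foldl_cons, pvB_step]
    by_cases hd : PySem.Str.isdigit c ∨ c = '.'
    · simp only [ihs, pvA_span, hd, if_pos]
      simp
    · simp only [if_neg hd]
      have := hn (acc ++ [t])
      simp only [List.foldl_cons, pvB_step] at this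
      rw [this]
      rw [pvA_span]
      simp [hd]

-- ===== VERDICT (by name: the statement is the Claim_ definition above) =====
theorem history_label_spec : Claim_equal_history_label := by
  intro history _
  unfold Spec_history_label history_label history_label_alt
  split
  · rfl
  · rw [pvA_loop_eq_map_label, (pvB_invariant history.toList).1 []]
    simp
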